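-- pv_equiv track=rewrite | github.com/christopher-dembski/advent_of_code_2024 | d25.py | parse_key
-- ===== SOURCE A (Python) =====
-- def parse_key(schematic):
--     key = []
--     for c in range(len(schematic[0])):
--         height = 0
--         r = len(schematic) - 2
--         while r > 0 and schematic[r][c] == '#':
--             height += 1
--             r -= 1
--         key.append(height)
--     return key
-- ===== SOURCE B (Python) =====
-- def parse_key(schematic):
--     cols = len(schematic[0])
--     # per-column state: (height counted so far, still inside the '#' run)
--     state = [(0, True)] * cols
--     for r in range(len(schematic) - 2, 0, -1):
--         row = schematic[r]
--         state = [(h + 1, True) if alive and row[c] == '#' else (h, False)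
--                  for c, (h, alive) in enumerate(state)]
--     return [h for h, _ in state]
-- ===== Notes on version B (the rewrite author's own statement) =====
-- stated objective: alternative
-- what changed: A scans column-major with an inner while counting each column's '#'-run separately; B makes a single row-major pass over rows len-2..1, carrying per-column (height, alive) state and extending every column's run simultaneously.
import Mathlib
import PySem

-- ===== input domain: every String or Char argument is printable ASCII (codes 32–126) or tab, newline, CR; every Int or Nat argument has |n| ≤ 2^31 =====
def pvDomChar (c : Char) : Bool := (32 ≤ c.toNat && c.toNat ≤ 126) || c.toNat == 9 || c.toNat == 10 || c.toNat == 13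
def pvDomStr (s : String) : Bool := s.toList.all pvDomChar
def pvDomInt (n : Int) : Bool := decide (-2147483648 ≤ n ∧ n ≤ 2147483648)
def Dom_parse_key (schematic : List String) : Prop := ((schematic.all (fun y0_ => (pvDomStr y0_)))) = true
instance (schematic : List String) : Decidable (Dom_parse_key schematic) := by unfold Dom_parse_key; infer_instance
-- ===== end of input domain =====

-- B replaces A's column-major inner-while scan by one row-major pass with per-column (height, alive) state (alternative decomposition, same cost).


-- ===== PORT A =====
-- while r > 0 and schematic[r][c] == '#': height += 1; r -= 1   (fuel = r; the getD defaults are only reached outside Pre_)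
def parse_key_while (schematic : List String) (c : Int) : Nat → Int → Int
  | 0, height => height
  | n+1, height =>
    if ((PySem.Str.pyGet? ((PySem.List.pyGet? schematic ((n : Int)+1)).getD "") c).getD ' ') == '#'
    then parse_key_while schematic c n (height + 1)
    else height

def parse_key (schematic : List String) : List Int :=
  (PySem.List.pyRange 0 (PySem.Str.len ((PySem.List.pyGet? schematic 0).getD "")) 1).foldl
    (fun key c => key ++ [parse_key_while schematic c (schematic.length - 2) 0]) []

-- ===== PORT B =====
-- one row of B: state = [(h+1, True) if alive and row[c] == '#' else (h, False) for c, (h, alive) in enumerate(state)]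
def parse_key_alt_row (schematic : List String) (state : List (Int × Bool)) (r : Int) : List (Int × Bool) :=
  let row := (PySem.List.pyGet? schematic r).getD ""
  (PySem.List.enumerate state).map (fun p =>
    if p.2.2 && (((PySem.Str.pyGet? row p.1).getD ' ') == '#') then (p.2.1 + 1, true) else (p.2.1, false))

def parse_key_alt (schematic : List String) : List Int :=
  let cols := PySem.Str.len ((PySem.List.pyGet? schematic 0).getD "")
  let final := (PySem.List.pyRange ((schematic.length : Int) - 2) 0 (-1)).foldl
    (parse_key_alt_row schematic) (PySem.List.pyRepeat [((0 : Int), true)] cols)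
  final.map (fun p => p.1)

-- ===== PRECONDITION & SPEC =====
-- Pre_ excludes exactly the inputs on which the Python raises IndexError: the empty list, and schematics where
-- some column c of row 0 reaches (every interior row scanned before it being an in-range '#') an interior row
-- (index 1..len-2) shorter than c+1; on every other input A returns normally.
def Pre_parse_key (schematic : List String) : Prop :=
  schematic ≠ [] ∧
  ∀ c ∈ List.range ((schematic.headD "").toList.length),
    ∀ i ∈ List.range schematic.length, 1 ≤ i → i + 2 ≤ schematic.length →
      (∀ r ∈ List.range schematic.length, i < r → r + 2 ≤ schematic.length →
          c < ((schematic.getD r "").toList.length) ∧ ((schematic.getD r "").toList.getD c ' ') = '#') →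
      c < ((schematic.getD i "").toList.length)
instance (schematic : List String) : Decidable (Pre_parse_key schematic) := by unfold Pre_parse_key; infer_instance

def pvWitness_parse_key : List String := ["#####", ".####", "..##.", "....."]

def Spec_parse_key (schematic : List String) (out : List Int) : Prop := out = parse_key_alt schematic
instance (schematic : List String) (out : List Int) : Decidable (Spec_parse_key schematic out) := by unfold Spec_parse_key; infer_instance

-- ===== CLAIM (what is proved, stated in full; the proofs are below) =====
def Claim_equal_parse_key : Prop := ∀ (schematic : List String), Dom_parse_key schematic → Pre_parse_key schematic → Spec_parse_key schematic (parse_key schematic)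

-- ===== LEMMAS AND PROOFS =====

-- the evolution of one column's (height, alive) pair over a list of row indices
def pvColRun (schematic : List String) (rs : List Int) (c : Int) (pr : Int × Bool) : Int × Bool :=
  rs.foldl (fun pr r =>
    if pr.2 && (((PySem.Str.pyGet? ((PySem.List.pyGet? schematic r).getD "") c).getD ' ') == '#')
    then (pr.1 + 1, true) else (pr.1, false)) pr

theorem pvColRun_nil (schematic : List String) (c : Int) (pr : Int × Bool) :
    pvColRun schematic [] c pr = pr := rfl

theorem pvColRun_dead (schematic : List String) (rs : List Int) (c : Int) (h : Int) :
    pvColRun schematic rs c (h, false) = (h, false) := by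
  induction rs with
  | nil => rfl
  | cons r rs ih => simpa [pvColRun, List.foldl_cons] using ih

theorem pv_enum_map_enum {α β : Type} (l : List α) (s : Int) (g : Int × α → β) :
    PySem.List.enumerate ((PySem.List.enumerate l s).map g) s
      = (PySem.List.enumerate l s).map (fun p => (p.1, g p)) := by
  induction l generalizing s with
  | nil => simp [PySem.List.enumerate_nil]
  | cons x xs ih => simp [PySem.List.enumerate_cons, ih]

theorem pv_step_snd (b : Bool) (h : Int) : (((h, true) : Int × Bool).2 && b) = b := by simp

-- B's row fold acts per column
theorem pvColRun_cons (schematic : List String) (r : Int) (rs : List Int) (c : Int) (pr : Int × Bool) :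
    pvColRun schematic (r :: rs) c pr
      = pvColRun schematic rs c
          (if pr.2 && (((PySem.Str.pyGet? ((PySem.List.pyGet? schematic r).getD "") c).getD ' ') == '#')
           then (pr.1 + 1, true) else (pr.1, false)) := rfl

theorem pv_fold_rows (schematic : List String) (rs : List Int) (s0 : List (Int × Bool)) :
    rs.foldl (parse_key_alt_row schematic) s0
      = (PySem.List.enumerate s0).map (fun p => pvColRun schematic rs p.1 p.2) := by
  induction rs generalizing s0 with
  | nil =>
    simp only [List.foldl_nil, pvColRun_nil]
    exact (PySem.List.map_snd_enumerate s0 0).symm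
  | cons r rs ih =>
    rw [List.foldl_cons, ih,
      show parse_key_alt_row schematic s0 r
        = (PySem.List.enumerate s0).map (fun p =>
            if p.2.2 && (((PySem.Str.pyGet? ((PySem.List.pyGet? schematic r).getD "") p.1).getD ' ') == '#')
            then (p.2.1 + 1, true) else (p.2.1, false)) from rfl,
      pv_enum_map_enum, List.map_map]
    apply List.map_congr_left
    intro p _
    simp only [Function.comp]
    rw [pvColRun_cons]

-- one column of B's pass computes A's inner while loop
theorem pvColRun_count (schematic : List String) (c : Int) (n : Nat) (h : Int) :
    (pvColRun schematic (PySem.List.pyRange (n : Int) 0 (-1)) c (h, true)).1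
      = parse_key_while schematic c n h := by
  induction n generalizing h with
  | zero =>
    rw [PySem.List.pyRange_neg_one_eq_nil (by omega)]
    rfl
  | succ n ih =>
    have hr : ((n + 1 : Nat) : Int) = (n : Int) + 1 := by push_cast; ring
    rw [hr, PySem.List.pyRange_neg_one_cons (by omega),
      show (n : Int) + 1 - 1 = (n : Int) from by ring, pvColRun_cons, pv_step_snd]
    cases hb : (((PySem.Str.pyGet? ((PySem.List.pyGet? schematic ((n : Int) + 1)).getD "") c).getD ' ') == '#') with
    | false =>
      rw [if_neg (show ¬(false = true) from by decide)]
      show (pvColRun schematic _ c (h, false)).1 = _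
      rw [pvColRun_dead]
      simp only [parse_key_while]
      rw [hb, if_neg (show ¬(false = true) from by decide)]
    | true =>
      rw [if_pos (show true = true from rfl)]
      show (pvColRun schematic _ c (h + 1, true)).1 = _
      rw [ih]
      simp only [parse_key_while]
      rw [hb, if_pos (show true = true from rfl)]

-- the countdown row ranges of the two ports coincide
theorem pv_rows_eq (len : Nat) :
    PySem.List.pyRange ((len : Int) - 2) 0 (-1)
      = PySem.List.pyRange ((len - 2 : Nat) : Int) 0 (-1) := by
  by_cases hl : 2 ≤ len
  · congr 1
    omega
  · rw [PySem.List.pyRange_neg_one_eq_nil (by omega),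
      PySem.List.pyRange_neg_one_eq_nil (by omega)]

-- ===== VERDICT (by name: the statement is the Claim_ definition above) =====
theorem parse_key_spec : Claim_equal_parse_key := by
  intro schematic _ _
  show parse_key schematic = parse_key_alt schematic
  unfold parse_key parse_key_alt
  rw [PySem.List.foldl_append_singleton_eq_map, List.nil_append]
  show List.map (fun c => parse_key_while schematic c (schematic.length - 2) 0)
      (PySem.List.pyRange 0 (PySem.Str.len ((PySem.List.pyGet? schematic 0).getD "")) 1) =
    ((PySem.List.pyRange ((schematic.length : Int) - 2) 0 (-1)).foldl
      (parse_key_alt_row schematic)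
      (PySem.List.pyRepeat [((0 : Int), true)]
        (PySem.Str.len ((PySem.List.pyGet? schematic 0).getD "")))).map (fun p => p.1)
  rw [pv_fold_rows, PySem.List.pyRepeat_singleton,
    PySem.List.enumerate_eq_map_pyRange _ ((0 : Int), true),
    List.map_map, List.map_map]
  have hnn : 0 ≤ PySem.Str.len ((PySem.List.pyGet? schematic 0).getD "") := by
    simp [PySem.Str.len_eq]
  have hlen : PySem.List.len (List.replicate (PySem.Str.len ((PySem.List.pyGet? schematic 0).getD "")).toNat ((0 : Int), true))
      = PySem.Str.len ((PySem.List.pyGet? schematic 0).getD "") := by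
    simp [PySem.List.len_eq]
  rw [hlen]
  apply List.map_congr_left
  intro j hj
  rw [PySem.List.mem_pyRange_one] at hj
  simp only [Function.comp]
  rw [PySem.List.pyGetD_eq_getElem _ _ hj.1 (by rw [List.length_replicate]; omega),
    List.getElem_replicate, pv_rows_eq schematic.length, pvColRun_count]
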